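-- pv_equiv track=rewrite | github.com/davidroman1914/vmware-mcp-server | mcp-server/helpers/vm_parser.py | group_vms_by_attributes
-- ===== SOURCE A (Python) =====
-- from typing import Dict, Any, List, Optional
-- from collections import defaultdict
--
-- def extract_vm_attributes(vm_name: str) -> Dict[str, str]:
--     """
--     Extract attributes from a VM name.
--
--     Args:
--         vm_name: Name of the VM
--
--     Returns:
--         Dictionary of extracted attributes
--     """
--     attributes = {
--         "name": vm_name,
--         "type": "unknown",
--         "environment": "unknown",
--         "role": "unknown"
--     }
--
--     vm_lower = vm_name.lower()
--
--     # Extract environment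
--     if any(env in vm_lower for env in ["prod", "production"]):
--         attributes["environment"] = "production"
--     elif any(env in vm_lower for env in ["staging", "stage"]):
--         attributes["environment"] = "staging"
--     elif any(env in vm_lower for env in ["dev", "development"]):
--         attributes["environment"] = "development"
--     elif any(env in vm_lower for env in ["test", "testing"]):
--         attributes["environment"] = "testing"
--     elif any(env in vm_lower for env in ["uat"]):
--         attributes["environment"] = "uat"
--
--     # Extract role/type
--     if any(role in vm_lower for role in ["worker", "node"]):
--         attributes["role"] = "worker"
--         attributes["type"] = "worker_node"
--     elif any(role in vm_lower for role in ["master", "control"]):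
--         attributes["role"] = "master"
--         attributes["type"] = "control_plane"
--     elif any(role in vm_lower for role in ["app", "application"]):
--         attributes["role"] = "application"
--         attributes["type"] = "application"
--     elif any(role in vm_lower for role in ["db", "database"]):
--         attributes["role"] = "database"
--         attributes["type"] = "database"
--     elif any(role in vm_lower for role in ["web", "frontend"]):
--         attributes["role"] = "web"
--         attributes["type"] = "web_server"
--     elif any(role in vm_lower for role in ["api", "backend"]):
--         attributes["role"] = "api"
--         attributes["type"] = "api_server"
--
--     return attributes
--
-- def group_vms_by_attributes(vm_names: List[str]) -> Dict[str, Any]: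
--     """
--     Group VMs by their extracted attributes.
--
--     Args:
--         vm_names: List of VM names to group
--
--     Returns:
--         Dictionary grouping VMs by various attributes
--     """
--     if not vm_names:
--         return {}
--
--     groups = {
--         "by_environment": defaultdict(list),
--         "by_role": defaultdict(list),
--         "by_type": defaultdict(list)
--     }
--
--     for vm_name in vm_names:
--         attributes = extract_vm_attributes(vm_name)
--
--         groups["by_environment"][attributes["environment"]].append(vm_name)
--         groups["by_role"][attributes["role"]].append(vm_name)
--         groups["by_type"][attributes["type"]].append(vm_name)
--
--     # Convert defaultdict to regular dict
--     return {
--         "by_environment": dict(groups["by_environment"]),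
--         "by_role": dict(groups["by_role"]),
--         "by_type": dict(groups["by_type"])
--     }
-- ===== SOURCE B (Python) =====
-- # Match-set classification (all matching rule indices, take the minimum) plus
-- # staged grouping: deduplicate keys, then one filter pass per distinct key --
-- # no dict accumulation, no if/elif cascade.
--
-- _ENV_VALUES = ["production", "staging", "development", "testing", "uat"]
-- _ENV_KW = [["prod", "production"], ["staging", "stage"], ["dev", "development"],
--            ["test", "testing"], ["uat"]]
--
-- _ROLE_VALUES = [("worker", "worker_node"), ("master", "control_plane"),
--                 ("application", "application"), ("database", "database"),
--                 ("web", "web_server"), ("api", "api_server")]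
-- _ROLE_KW = [["worker", "node"], ["master", "control"], ["app", "application"],
--             ["db", "database"], ["web", "frontend"], ["api", "backend"]]
--
--
-- def _best_rule(kw_groups, low):
--     """Indices of ALL matching rules; the winning rule is the minimum index."""
--     hits = [i for i, kws in enumerate(kw_groups) if any(k in low for k in kws)]
--     return min(hits) if hits else None
--
--
-- def _classify(name):
--     low = name.lower()
--     e = _best_rule(_ENV_KW, low)
--     rt = _best_rule(_ROLE_KW, low)
--     return ("unknown" if e is None else _ENV_VALUES[e],
--             "unknown" if rt is None else _ROLE_VALUES[rt][0],
--             "unknown" if rt is None else _ROLE_VALUES[rt][1])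
--
--
-- def _grouped(pairs):
--     keys = list(dict.fromkeys(k for k, _ in pairs))
--     return {k: [n for kk, n in pairs if kk == k] for k in keys}
--
--
-- def group_vms_by_attributes(vm_names):
--     if not vm_names:
--         return {}
--     triples = [_classify(n) for n in vm_names]
--     return {
--         "by_environment": _grouped([(t[0], n) for t, n in zip(triples, vm_names)]),
--         "by_role": _grouped([(t[1], n) for t, n in zip(triples, vm_names)]),
--         "by_type": _grouped([(t[2], n) for t, n in zip(triples, vm_names)]),
--     }
-- ===== Notes on version B (the rewrite author's own statement) =====
-- stated objective: alternative
-- what changed: Classification now collects the set of ALL matching keyword rules and takes the minimum rule index (vs A's elif cascade stopping at the first hit), and grouping is staged: per attribute it deduplicates the classification keys and builds each group by a filter pass over the names per distinct key, instead of A's single pass appending into three defaultdicts.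
import Mathlib
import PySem

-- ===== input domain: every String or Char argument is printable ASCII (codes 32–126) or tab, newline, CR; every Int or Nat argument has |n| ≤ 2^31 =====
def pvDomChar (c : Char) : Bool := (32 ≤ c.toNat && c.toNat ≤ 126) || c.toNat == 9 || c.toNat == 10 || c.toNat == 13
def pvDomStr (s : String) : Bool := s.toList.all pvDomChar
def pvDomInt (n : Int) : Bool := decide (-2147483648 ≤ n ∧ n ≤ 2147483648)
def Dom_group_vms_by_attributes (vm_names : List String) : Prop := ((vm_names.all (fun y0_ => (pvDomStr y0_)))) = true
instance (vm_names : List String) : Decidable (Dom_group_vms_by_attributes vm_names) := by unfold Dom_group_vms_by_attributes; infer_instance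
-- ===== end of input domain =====

-- B replaces A's elif cascades by a match-set/minimum-index classification and A's
-- single accumulating dict pass by staged key-dedup + one filter pass per distinct key (alternative decomposition, same asymptotic cost).

-- ===== PORT A =====
def extract_vm_attributes (vm_name : String) : PySem.Dict String String :=
  let attributes : PySem.Dict String String :=
    PySem.Dict.ofList [("name", vm_name), ("type", "unknown"), ("environment", "unknown"), ("role", "unknown")]
  let vm_lower := PySem.Str.lower vm_name
  let attributes :=
    if ["prod", "production"].any (fun e => PySem.Str.isIn e vm_lower) then
      attributes.insert "environment" "production"
    else if ["staging", "stage"].any (fun e => PySem.Str.isIn e vm_lower) then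
      attributes.insert "environment" "staging"
    else if ["dev", "development"].any (fun e => PySem.Str.isIn e vm_lower) then
      attributes.insert "environment" "development"
    else if ["test", "testing"].any (fun e => PySem.Str.isIn e vm_lower) then
      attributes.insert "environment" "testing"
    else if ["uat"].any (fun e => PySem.Str.isIn e vm_lower) then
      attributes.insert "environment" "uat"
    else attributes
  let attributes :=
    if ["worker", "node"].any (fun r => PySem.Str.isIn r vm_lower) then
      (attributes.insert "role" "worker").insert "type" "worker_node"
    else if ["master", "control"].any (fun r => PySem.Str.isIn r vm_lower) then
      (attributes.insert "role" "master").insert "type" "control_plane"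
    else if ["app", "application"].any (fun r => PySem.Str.isIn r vm_lower) then
      (attributes.insert "role" "application").insert "type" "application"
    else if ["db", "database"].any (fun r => PySem.Str.isIn r vm_lower) then
      (attributes.insert "role" "database").insert "type" "database"
    else if ["web", "frontend"].any (fun r => PySem.Str.isIn r vm_lower) then
      (attributes.insert "role" "web").insert "type" "web_server"
    else if ["api", "backend"].any (fun r => PySem.Str.isIn r vm_lower) then
      (attributes.insert "role" "api").insert "type" "api_server"
    else attributes
  attributes

-- defaultdict(list)[k].append(vm) is exactly Dict.modify k [] (· ++ [vm])
def group_vms_by_attributes (vm_names : List String) : List (String × List (String × List String)) :=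
  if vm_names = [] then []
  else
    let groups : PySem.Dict String (List String) × PySem.Dict String (List String) × PySem.Dict String (List String) :=
      vm_names.foldl (fun g vm_name =>
        let attributes := extract_vm_attributes vm_name
        (g.1.modify (attributes.getD "environment" "") [] (· ++ [vm_name]),
         g.2.1.modify (attributes.getD "role" "") [] (· ++ [vm_name]),
         g.2.2.modify (attributes.getD "type" "") [] (· ++ [vm_name])))
        (PySem.Dict.empty, PySem.Dict.empty, PySem.Dict.empty)
    [("by_environment", groups.1.items), ("by_role", groups.2.1.items), ("by_type", groups.2.2.items)]

-- ===== PORT B =====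
def envValues : List String := ["production", "staging", "development", "testing", "uat"]
def envKW : List (List String) :=
  [["prod", "production"], ["staging", "stage"], ["dev", "development"], ["test", "testing"], ["uat"]]
def roleValues : List (String × String) :=
  [("worker", "worker_node"), ("master", "control_plane"), ("application", "application"),
   ("database", "database"), ("web", "web_server"), ("api", "api_server")]
def roleKW : List (List String) :=
  [["worker", "node"], ["master", "control"], ["app", "application"],
   ["db", "database"], ["web", "frontend"], ["api", "backend"]]

def bestRule (kwGroups : List (List String)) (low : String) : Option Int :=
  (((PySem.List.enumerate kwGroups).filter
      (fun p => p.2.any (fun k => PySem.Str.isIn k low))).map (fun p => p.1)).min?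

def classify (name : String) : String × String × String :=
  let low := PySem.Str.lower name
  let e := bestRule envKW low
  let rt := bestRule roleKW low
  ((match e with | none => "unknown" | some i => PySem.List.pyGetD envValues i "unknown"),
   (match rt with | none => "unknown" | some i => (PySem.List.pyGetD roleValues i ("unknown", "unknown")).1),
   (match rt with | none => "unknown" | some i => (PySem.List.pyGetD roleValues i ("unknown", "unknown")).2))

def grouped (pairs : List (String × String)) : List (String × List String) :=
  (PySem.List.dedup (pairs.map (fun p => p.1))).map
    (fun k => (k, (pairs.filter (fun p => p.1 == k)).map (fun p => p.2)))

def group_vms_by_attributes_alt (vm_names : List String) : List (String × List (String × List String)) :=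
  if vm_names = [] then []
  else
    let triples := vm_names.map classify
    [("by_environment", grouped ((triples.zip vm_names).map (fun p => (p.1.1, p.2)))),
     ("by_role", grouped ((triples.zip vm_names).map (fun p => (p.1.2.1, p.2)))),
     ("by_type", grouped ((triples.zip vm_names).map (fun p => (p.1.2.2, p.2))))]

-- ===== PRECONDITION & SPEC =====
def Spec_group_vms_by_attributes (vm_names : List String) (out : List (String × List (String × List String))) : Prop := out = group_vms_by_attributes_alt vm_names
instance (vm_names : List String) (out : List (String × List (String × List String))) : Decidable (Spec_group_vms_by_attributes vm_names out) := by unfold Spec_group_vms_by_attributes; infer_instance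

-- ===== CLAIM (what is proved, stated in full; the proofs are below) =====
def Claim_equal_group_vms_by_attributes : Prop := ∀ (vm_names : List String), Dom_group_vms_by_attributes vm_names → Spec_group_vms_by_attributes vm_names (group_vms_by_attributes vm_names)

-- ===== LEMMAS AND PROOFS =====

theorem roleLayer_getD_role (E : PySem.Dict String String) (b1 b2 b3 b4 b5 b6 : Bool) :
    (if b1 then (E.insert "role" "worker").insert "type" "worker_node"
     else if b2 then (E.insert "role" "master").insert "type" "control_plane"
     else if b3 then (E.insert "role" "application").insert "type" "application"
     else if b4 then (E.insert "role" "database").insert "type" "database"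
     else if b5 then (E.insert "role" "web").insert "type" "web_server"
     else if b6 then (E.insert "role" "api").insert "type" "api_server"
     else E).getD "role" "" =
      (if b1 then "worker" else if b2 then "master" else if b3 then "application"
       else if b4 then "database" else if b5 then "web" else if b6 then "api"
       else E.getD "role" "") := by
  split_ifs <;> simp [PySem.Dict.getD_insert]

theorem roleLayer_getD_type (E : PySem.Dict String String) (b1 b2 b3 b4 b5 b6 : Bool) :
    (if b1 then (E.insert "role" "worker").insert "type" "worker_node"
     else if b2 then (E.insert "role" "master").insert "type" "control_plane"
     else if b3 then (E.insert "role" "application").insert "type" "application"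
     else if b4 then (E.insert "role" "database").insert "type" "database"
     else if b5 then (E.insert "role" "web").insert "type" "web_server"
     else if b6 then (E.insert "role" "api").insert "type" "api_server"
     else E).getD "type" "" =
      (if b1 then "worker_node" else if b2 then "control_plane" else if b3 then "application"
       else if b4 then "database" else if b5 then "web_server" else if b6 then "api_server"
       else E.getD "type" "") := by
  split_ifs <;> simp [PySem.Dict.getD_insert]

theorem roleLayer_getD_env (E : PySem.Dict String String) (b1 b2 b3 b4 b5 b6 : Bool) :
    (if b1 then (E.insert "role" "worker").insert "type" "worker_node"
     else if b2 then (E.insert "role" "master").insert "type" "control_plane"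
     else if b3 then (E.insert "role" "application").insert "type" "application"
     else if b4 then (E.insert "role" "database").insert "type" "database"
     else if b5 then (E.insert "role" "web").insert "type" "web_server"
     else if b6 then (E.insert "role" "api").insert "type" "api_server"
     else E).getD "environment" "" = E.getD "environment" "" := by
  split_ifs <;> simp [PySem.Dict.getD_insert]


theorem envLayer_getD (name k : String) (hk : k ≠ "environment") (a1 a2 a3 a4 a5 : Bool) :
    (if a1 then (PySem.Dict.ofList [("name", name), ("type", "unknown"), ("environment", "unknown"), ("role", "unknown")]).insert "environment" "production"
     else if a2 then (PySem.Dict.ofList [("name", name), ("type", "unknown"), ("environment", "unknown"), ("role", "unknown")]).insert "environment" "staging"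
     else if a3 then (PySem.Dict.ofList [("name", name), ("type", "unknown"), ("environment", "unknown"), ("role", "unknown")]).insert "environment" "development"
     else if a4 then (PySem.Dict.ofList [("name", name), ("type", "unknown"), ("environment", "unknown"), ("role", "unknown")]).insert "environment" "testing"
     else if a5 then (PySem.Dict.ofList [("name", name), ("type", "unknown"), ("environment", "unknown"), ("role", "unknown")]).insert "environment" "uat"
     else PySem.Dict.ofList [("name", name), ("type", "unknown"), ("environment", "unknown"), ("role", "unknown")]).getD k ""
      = (PySem.Dict.ofList [("name", name), ("type", "unknown"), ("environment", "unknown"), ("role", "unknown")]).getD k "" := by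
  split_ifs <;> simp [PySem.Dict.getD_insert, hk]

theorem envLayer_getD_env (name : String) (a1 a2 a3 a4 a5 : Bool) :
    (if a1 then (PySem.Dict.ofList [("name", name), ("type", "unknown"), ("environment", "unknown"), ("role", "unknown")]).insert "environment" "production"
     else if a2 then (PySem.Dict.ofList [("name", name), ("type", "unknown"), ("environment", "unknown"), ("role", "unknown")]).insert "environment" "staging"
     else if a3 then (PySem.Dict.ofList [("name", name), ("type", "unknown"), ("environment", "unknown"), ("role", "unknown")]).insert "environment" "development"
     else if a4 then (PySem.Dict.ofList [("name", name), ("type", "unknown"), ("environment", "unknown"), ("role", "unknown")]).insert "environment" "testing"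
     else if a5 then (PySem.Dict.ofList [("name", name), ("type", "unknown"), ("environment", "unknown"), ("role", "unknown")]).insert "environment" "uat"
     else PySem.Dict.ofList [("name", name), ("type", "unknown"), ("environment", "unknown"), ("role", "unknown")]).getD "environment" ""
      = (if a1 then "production" else if a2 then "staging" else if a3 then "development"
         else if a4 then "testing" else if a5 then "uat" else "unknown") := by
  split_ifs <;> simp [PySem.Dict.ofList, PySem.Dict.getD_eq_get?_getD, PySem.Dict.get?_insert, PySem.Dict.update]

set_option maxHeartbeats 1000000 in
theorem env_eq (name : String) :
    (extract_vm_attributes name).getD "environment" "" = (classify name).1 := by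
  unfold extract_vm_attributes classify bestRule envKW envValues roleKW roleValues
  simp only [PySem.List.enumerate_cons, PySem.List.enumerate_nil, List.filter]
  generalize (["prod", "production"].any fun e => PySem.Str.isIn e (PySem.Str.lower name)) = c1
  generalize (["staging", "stage"].any fun e => PySem.Str.isIn e (PySem.Str.lower name)) = c2
  generalize (["dev", "development"].any fun e => PySem.Str.isIn e (PySem.Str.lower name)) = c3
  generalize (["test", "testing"].any fun e => PySem.Str.isIn e (PySem.Str.lower name)) = c4
  generalize (["uat"].any fun e => PySem.Str.isIn e (PySem.Str.lower name)) = c5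
  generalize (["worker", "node"].any fun r => PySem.Str.isIn r (PySem.Str.lower name)) = d1
  generalize (["master", "control"].any fun r => PySem.Str.isIn r (PySem.Str.lower name)) = d2
  generalize (["app", "application"].any fun r => PySem.Str.isIn r (PySem.Str.lower name)) = d3
  generalize (["db", "database"].any fun r => PySem.Str.isIn r (PySem.Str.lower name)) = d4
  generalize (["web", "frontend"].any fun r => PySem.Str.isIn r (PySem.Str.lower name)) = d5
  generalize (["api", "backend"].any fun r => PySem.Str.isIn r (PySem.Str.lower name)) = d6
  rw [roleLayer_getD_env, envLayer_getD_env]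
  cases c1 <;> cases c2 <;> cases c3 <;> cases c4 <;> cases c5 <;> rfl

set_option maxHeartbeats 1000000 in
theorem role_eq (name : String) :
    (extract_vm_attributes name).getD "role" "" = (classify name).2.1 := by
  unfold extract_vm_attributes classify bestRule envKW envValues roleKW roleValues
  simp only [PySem.List.enumerate_cons, PySem.List.enumerate_nil, List.filter]
  generalize (["prod", "production"].any fun e => PySem.Str.isIn e (PySem.Str.lower name)) = c1
  generalize (["staging", "stage"].any fun e => PySem.Str.isIn e (PySem.Str.lower name)) = c2
  generalize (["dev", "development"].any fun e => PySem.Str.isIn e (PySem.Str.lower name)) = c3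
  generalize (["test", "testing"].any fun e => PySem.Str.isIn e (PySem.Str.lower name)) = c4
  generalize (["uat"].any fun e => PySem.Str.isIn e (PySem.Str.lower name)) = c5
  generalize (["worker", "node"].any fun r => PySem.Str.isIn r (PySem.Str.lower name)) = d1
  generalize (["master", "control"].any fun r => PySem.Str.isIn r (PySem.Str.lower name)) = d2
  generalize (["app", "application"].any fun r => PySem.Str.isIn r (PySem.Str.lower name)) = d3
  generalize (["db", "database"].any fun r => PySem.Str.isIn r (PySem.Str.lower name)) = d4
  generalize (["web", "frontend"].any fun r => PySem.Str.isIn r (PySem.Str.lower name)) = d5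
  generalize (["api", "backend"].any fun r => PySem.Str.isIn r (PySem.Str.lower name)) = d6
  rw [roleLayer_getD_role, envLayer_getD name "role" (by decide)]
  have hrole : (PySem.Dict.ofList [("name", name), ("type", "unknown"), ("environment", "unknown"), ("role", "unknown")]).getD "role" "" = "unknown" := by
    simp [PySem.Dict.ofList, PySem.Dict.getD_eq_get?_getD, PySem.Dict.get?_insert, PySem.Dict.update]
  rw [hrole]
  cases d1 <;> cases d2 <;> cases d3 <;> cases d4 <;> cases d5 <;> cases d6 <;> rfl

set_option maxHeartbeats 1000000 in
theorem type_eq (name : String) :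
    (extract_vm_attributes name).getD "type" "" = (classify name).2.2 := by
  unfold extract_vm_attributes classify bestRule envKW envValues roleKW roleValues
  simp only [PySem.List.enumerate_cons, PySem.List.enumerate_nil, List.filter]
  generalize (["prod", "production"].any fun e => PySem.Str.isIn e (PySem.Str.lower name)) = c1
  generalize (["staging", "stage"].any fun e => PySem.Str.isIn e (PySem.Str.lower name)) = c2
  generalize (["dev", "development"].any fun e => PySem.Str.isIn e (PySem.Str.lower name)) = c3
  generalize (["test", "testing"].any fun e => PySem.Str.isIn e (PySem.Str.lower name)) = c4
  generalize (["uat"].any fun e => PySem.Str.isIn e (PySem.Str.lower name)) = c5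
  generalize (["worker", "node"].any fun r => PySem.Str.isIn r (PySem.Str.lower name)) = d1
  generalize (["master", "control"].any fun r => PySem.Str.isIn r (PySem.Str.lower name)) = d2
  generalize (["app", "application"].any fun r => PySem.Str.isIn r (PySem.Str.lower name)) = d3
  generalize (["db", "database"].any fun r => PySem.Str.isIn r (PySem.Str.lower name)) = d4
  generalize (["web", "frontend"].any fun r => PySem.Str.isIn r (PySem.Str.lower name)) = d5
  generalize (["api", "backend"].any fun r => PySem.Str.isIn r (PySem.Str.lower name)) = d6
  rw [roleLayer_getD_type, envLayer_getD name "type" (by decide)]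
  have htype : (PySem.Dict.ofList [("name", name), ("type", "unknown"), ("environment", "unknown"), ("role", "unknown")]).getD "type" "" = "unknown" := by
    simp [PySem.Dict.ofList, PySem.Dict.getD_eq_get?_getD, PySem.Dict.get?_insert, PySem.Dict.update]
  rw [htype]
  cases d1 <;> cases d2 <;> cases d3 <;> cases d4 <;> cases d5 <;> cases d6 <;> rfl

-- A's one pass building a triple of dicts equals three independent passes.
theorem foldl_triple (l : List String)
    (f g h : String → String)
    (a b c : PySem.Dict String (List String)) :
    l.foldl (fun t vm =>
        (t.1.modify (f vm) [] (· ++ [vm]),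
         t.2.1.modify (g vm) [] (· ++ [vm]),
         t.2.2.modify (h vm) [] (· ++ [vm]))) (a, b, c)
    = (l.foldl (fun d vm => d.modify (f vm) [] (· ++ [vm])) a,
       l.foldl (fun d vm => d.modify (g vm) [] (· ++ [vm])) b,
       l.foldl (fun d vm => d.modify (h vm) [] (· ++ [vm])) c) := by
  induction l generalizing a b c with
  | nil => rfl
  | cons x xs ih => simp [List.foldl, ih]

-- A's accumulating group dict, read out as items, is B's dedup-keys + per-key filter.
theorem items_group (f : String → String) (l : List String) :
    (l.foldl (fun d vm => d.modify (f vm) [] (· ++ [vm]))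
      (PySem.Dict.empty : PySem.Dict String (List String))).items
    = grouped (l.map (fun vm => (f vm, vm))) := by
  have hnd : (l.foldl (fun d vm => d.modify (f vm) [] (· ++ [vm]))
      (PySem.Dict.empty : PySem.Dict String (List String))).keys.Nodup := by
    exact PySem.Dict.nodup_keys_foldl_modify_key l f [] (fun _ vm => (· ++ [vm])) _ (by simp)
  rw [PySem.Dict.items_eq_map_keys _ hnd []]
  rw [PySem.Dict.keys_foldl_modify_key l f [] (fun _ vm => (· ++ [vm]))]
  have hfold : (l.foldl (fun d vm => d.modify (f vm) [] (· ++ [vm]))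
      (PySem.Dict.empty : PySem.Dict String (List String)))
      = (l.map (fun vm => (f vm, vm))).foldl (fun d p => d.modify p.1 [] (· ++ [p.2])) PySem.Dict.empty := by
    rw [List.foldl_map]
  unfold grouped
  rw [hfold]
  have hkeys : PySem.Set.update (PySem.Dict.empty : PySem.Dict String (List String)).keys (l.map f)
      = PySem.List.dedup ((l.map (fun vm => (f vm, vm))).map (fun p => p.1)) := by
    simp [PySem.List.dedup_eq_ofList]; rfl
  rw [hkeys]
  refine List.map_congr_left ?_
  intro k _
  rw [PySem.Dict.getD_foldl_modify_append]
  simp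

-- zipping the precomputed triples back with the names is a single map
theorem zip_map_classify (l : List String) (g : String × String × String → String) :
    ((l.map classify).zip l).map (fun p => (g p.1, p.2)) = l.map (fun vm => (g (classify vm), vm)) := by
  induction l with
  | nil => rfl
  | cons x xs ih => simp [ih]

-- ===== VERDICT (by name: the statement is the Claim_ definition above) =====
theorem group_vms_by_attributes_spec : Claim_equal_group_vms_by_attributes := by
  intro vm_names _
  unfold Spec_group_vms_by_attributes group_vms_by_attributes group_vms_by_attributes_alt
  by_cases hnil : vm_names = []
  · simp [hnil]
  · simp only [if_neg hnil]
    simp only [env_eq, role_eq, type_eq]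
    rw [foldl_triple vm_names (fun vm => (classify vm).1) (fun vm => (classify vm).2.1) (fun vm => (classify vm).2.2)]
    simp only [items_group]
    rw [show ((vm_names.map classify).zip vm_names).map (fun p => (p.1.1, p.2)) = vm_names.map (fun vm => ((classify vm).1, vm)) from zip_map_classify vm_names (fun t => t.1)]
    rw [show ((vm_names.map classify).zip vm_names).map (fun p => (p.1.2.1, p.2)) = vm_names.map (fun vm => ((classify vm).2.1, vm)) from zip_map_classify vm_names (fun t => t.2.1)]
    rw [show ((vm_names.map classify).zip vm_names).map (fun p => (p.1.2.2, p.2)) = vm_names.map (fun vm => ((classify vm).2.2, vm)) from zip_map_classify vm_names (fun t => t.2.2)]
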